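-- pv_equiv track=rewrite | github.com/Augusto12/qclib | qclib/qrd.py | build_gray_codes
-- ===== SOURCE A (Python) =====
-- def build_gray_codes(n1, n2, n_qubits):
--     if n1 > n2:
--         n1, n2 = n2, n1
--     codes = [n1]
--     for i in range(n_qubits):
--         bit = 1<<i
--         if (bit & n1 == 0) and (bit & n2 == bit):
--             n1 = n1 | bit
--         elif (bit & n1 == bit) and (bit & n2 == 0):
--             n1 = n1 ^ bit
--         if n1 != codes[-1]:
--             codes.append(n1)
--     return codes
-- ===== SOURCE B (Python) =====
-- def build_gray_codes(n1, n2, n_qubits):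
--     if n1 > n2:
--         n1, n2 = n2, n1
--     m = ((n1 ^ n2) & ((1 << n_qubits) - 1)) if n_qubits > 0 else 0
--     out = [n1 ^ m]
--     while m:
--         m ^= 1 << (m.bit_length() - 1)
--         out.append(n1 ^ m)
--     out.reverse()
--     return out
-- ===== Notes on version B (the rewrite author's own statement) =====
-- stated objective: faster
-- what changed: B extracts only the set bits of (n1 ^ n2) masked to n_qubits bits and builds the gray-code path back-to-front via bit_length, instead of A's scan over every qubit index with per-bit conditional updates.
import Mathlib
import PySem

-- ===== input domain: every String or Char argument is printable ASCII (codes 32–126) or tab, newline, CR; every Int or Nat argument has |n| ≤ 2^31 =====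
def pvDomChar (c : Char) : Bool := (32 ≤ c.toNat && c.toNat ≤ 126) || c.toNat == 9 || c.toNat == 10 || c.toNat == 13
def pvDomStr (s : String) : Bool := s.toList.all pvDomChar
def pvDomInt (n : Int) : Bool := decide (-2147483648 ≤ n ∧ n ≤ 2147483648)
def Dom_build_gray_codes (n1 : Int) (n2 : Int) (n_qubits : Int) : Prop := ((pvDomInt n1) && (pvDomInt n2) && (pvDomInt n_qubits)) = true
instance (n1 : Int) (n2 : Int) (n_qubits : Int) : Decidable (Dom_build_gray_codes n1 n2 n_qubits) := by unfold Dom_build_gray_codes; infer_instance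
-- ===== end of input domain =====

-- B replaces A's per-qubit scan by extracting only the set bits of (n1 ^ n2) & mask,
-- building the gray-code path back-to-front via bit_length (objective: faster when
-- n_qubits is large and few bits differ; both return the identical list).

-- ===== PORT A =====
-- one iteration of A's `for i in range(n_qubits)` loop; state = (n1, codes)
def pvAStep (n2 : Int) (st : Int × List Int) (i : Int) : Int × List Int :=
  let bit : Int := (1 : Int) <<< i.toNat   -- Python `1 << i`; i ranges over range(n_qubits) so i ≥ 0 and toNat is exact
  let a :=
    if PySem.Int.band bit st.1 = 0 ∧ PySem.Int.band bit n2 = bit then PySem.Int.bor st.1 bit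
    else if PySem.Int.band bit st.1 = bit ∧ PySem.Int.band bit n2 = 0 then PySem.Int.bxor st.1 bit
    else st.1
  -- `if n1 != codes[-1]: codes.append(n1)`; codes is never empty so codes[-1] never raises
  if a ≠ PySem.List.pyGetD st.2 (-1) 0 then (a, st.2 ++ [a]) else (a, st.2)

def build_gray_codes (n1 : Int) (n2 : Int) (n_qubits : Int) : List Int :=
  let p := if n1 > n2 then (n2, n1) else (n1, n2)
  ((PySem.List.pyRange 0 n_qubits 1).foldl (pvAStep p.2) (p.1, [p.1])).2

-- ===== PORT B =====
-- Source B's `while m:` loop; fuel = bit_length of the initial m: each iteration clears the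
-- current top bit of m, so bit_length m iterations always reach m = 0 (totalization guard only)
def pvBLoop (a : Int) : Nat → Int → List Int → List Int
  | 0, _, out => out
  | fuel+1, m, out =>
    if m = 0 then out
    else
      let m' := PySem.Int.bxor m ((1 : Int) <<< (PySem.Int.bitLength m - 1))  -- m ^= 1 << (m.bit_length() - 1)
      pvBLoop a fuel m' (out ++ [PySem.Int.bxor a m'])

def build_gray_codes_alt (n1 : Int) (n2 : Int) (n_qubits : Int) : List Int :=
  let p := if n1 > n2 then (n2, n1) else (n1, n2)
  let m : Int := if n_qubits > 0 then
      PySem.Int.band (PySem.Int.bxor p.1 p.2) (((1 : Int) <<< n_qubits.toNat) - 1)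
    else 0
  (pvBLoop p.1 (PySem.Int.bitLength m) m [PySem.Int.bxor p.1 m]).reverse

-- ===== PRECONDITION & SPEC =====
def Spec_build_gray_codes (n1 : Int) (n2 : Int) (n_qubits : Int) (out : List Int) : Prop := out = build_gray_codes_alt n1 n2 n_qubits
instance (n1 : Int) (n2 : Int) (n_qubits : Int) (out : List Int) : Decidable (Spec_build_gray_codes n1 n2 n_qubits out) := by unfold Spec_build_gray_codes; infer_instance

-- ===== CLAIM (what is proved, stated in full; the proofs are below) =====
def Claim_equal_build_gray_codes : Prop := ∀ (n1 : Int) (n2 : Int) (n_qubits : Int), Dom_build_gray_codes n1 n2 n_qubits → Spec_build_gray_codes n1 n2 n_qubits (build_gray_codes n1 n2 n_qubits)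

-- ===== LEMMAS AND PROOFS =====

-- Python's bit i of an arbitrary int (two's complement, infinitely sign-extended)
def pvIbit (x : Int) (i : Nat) : Bool :=
  if 0 ≤ x then x.toNat.testBit i else !((-x - 1).toNat.testBit i)

-- `x & (2^k - 1)` (Python's low-k-bits mask) as a natural number
def pvMask (x : Int) (k : Nat) : Nat :=
  if 0 ≤ x then x.toNat % 2 ^ k else 2 ^ k - 1 - (-x - 1).toNat % 2 ^ k

lemma pv_shl_one (i : Nat) : ((1 : Int) <<< i) = ((2 ^ i : Nat) : Int) := by
  simp [Int.shiftLeft_eq]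

-- ---- Nat-level bit facts ----

lemma pv_tb_mod {m : Nat} {i : Nat} (h : m.testBit i = false) : m % 2 ^ (i + 1) < 2 ^ i := by
  have h1 := Nat.mod_pow_succ (x := m) (b := 2) (k := i)
  have h2 : m / 2 ^ i % 2 = 0 := by
    have hd := Nat.testBit_eq_decide_div_mod_eq (x := m) (i := i)
    rw [h] at hd
    have := of_decide_eq_false hd.symm
    omega
  have h3 : m % 2 ^ i < 2 ^ i := Nat.mod_lt _ (by positivity)
  rw [h2] at h1
  omega

lemma pv_tb_high {m i j : Nat} (h : m.testBit i = false) (hj : i < j) :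
    (2 ^ i + m).testBit j = m.testBit j := by
  obtain ⟨t, rfl⟩ : ∃ t, j = t + (i + 1) := ⟨j - (i + 1), by omega⟩
  have hm := pv_tb_mod h
  have hdiv : (2 ^ i + m) / 2 ^ (i + 1) = m / 2 ^ (i + 1) := by
    conv_lhs => rw [← Nat.div_add_mod m (2 ^ (i + 1))]
    have hpow : (2 : Nat) ^ (i + 1) = 2 * 2 ^ i := by ring
    rw [Nat.add_comm (2 ^ (i + 1) * (m / 2 ^ (i + 1))) (m % 2 ^ (i + 1)), ← Nat.add_assoc,
        Nat.add_mul_div_left _ _ (by positivity : 0 < 2 ^ (i + 1)),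
        Nat.div_eq_of_lt (by omega)]
    omega
  rw [Nat.testBit_add, Nat.testBit_add, hdiv]

lemma pv_nxor0 {m i : Nat} (h : m.testBit i = false) : (2 ^ i + m) ^^^ 2 ^ i = m := by
  apply Nat.eq_of_testBit_eq
  intro j
  rcases lt_trichotomy j i with hj | rfl | hj
  · rw [Nat.testBit_xor, Nat.testBit_two_pow_add_gt hj, Nat.testBit_two_pow]
    simp [Nat.ne_of_gt hj]
  · rw [Nat.testBit_xor, Nat.testBit_two_pow_add_eq, Nat.testBit_two_pow_self, h]
    simp
  · rw [Nat.testBit_xor, pv_tb_high h hj, Nat.testBit_two_pow]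
    simp [Nat.ne_of_lt hj]

lemma pv_nxor1 {m i : Nat} (h : m.testBit i = false) : m ^^^ 2 ^ i = 2 ^ i + m := by
  have h0 := pv_nxor0 (h := h)
  calc m ^^^ 2 ^ i = ((2 ^ i + m) ^^^ 2 ^ i) ^^^ 2 ^ i := by rw [h0]
    _ = (2 ^ i + m) ^^^ (2 ^ i ^^^ 2 ^ i) := by rw [Nat.xor_assoc]
    _ = 2 ^ i + m := by simp

lemma pv_tb_form {s r i : Nat} (hr : r < 2 ^ i) : (2 ^ (i + 1) * s + r).testBit i = false := by
  rw [Nat.testBit_eq_decide_div_mod_eq]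
  have hpos : (0 : Nat) < 2 ^ i := by positivity
  have h : (2 ^ (i + 1) * s + r) / 2 ^ i = 2 * s := by
    have h2 : (2 : Nat) ^ (i + 1) * s = 2 ^ i * (2 * s) := by ring
    rw [h2, Nat.add_comm, Nat.add_mul_div_left _ _ hpos, Nat.div_eq_of_lt hr, Nat.zero_add]
  rw [h]
  simp [Nat.mul_mod_right]

lemma pv_decomp {n i : Nat} (h : n.testBit i = true) :
    ∃ m, m.testBit i = false ∧ n = 2 ^ i + m := by
  have h2 : n / 2 ^ i % 2 = 1 := by
    have hd := Nat.testBit_eq_decide_div_mod_eq (x := n) (i := i)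
    rw [h] at hd
    exact of_decide_eq_true hd.symm
  obtain ⟨s, hs⟩ : ∃ s, n / 2 ^ i = 2 * s + 1 := ⟨n / 2 ^ i / 2, by omega⟩
  have hdm := Nat.div_add_mod n (2 ^ i)
  refine ⟨2 ^ (i + 1) * s + n % 2 ^ i, pv_tb_form (Nat.mod_lt _ (by positivity)), ?_⟩
  have hp : (2 : Nat) ^ (i + 1) * s = 2 ^ i * (2 * s) := by ring
  rw [hs] at hdm
  rw [hp]
  have h5 : (2 : Nat) ^ i * (2 * s + 1) = 2 ^ i * (2 * s) + 2 ^ i := by ring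
  omega

lemma pv_nxor2 {n i : Nat} (h : n.testBit i = true) : n ^^^ 2 ^ i = n - 2 ^ i ∧ 2 ^ i ≤ n := by
  obtain ⟨m, hm, rfl⟩ := pv_decomp h
  rw [pv_nxor0 hm]
  omega

-- ---- Int-level facts about the PySem bitwise primitives ----

lemma pv_ibit_natCast (m : Nat) (i : Nat) : pvIbit (↑m) i = m.testBit i := by
  simp [pvIbit]

lemma pv_neg_aux (k : Nat) : ¬ (0 : Int) ≤ -(k : Int) - 1 := by omega

lemma pv_neg_aux2 (k : Nat) : (-(-(k : Int) - 1) - 1).toNat = k := by omega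

lemma pv_band_pow (x : Int) (i : Nat) :
    PySem.Int.band ((1 : Int) <<< i) x = if pvIbit x i then (1 : Int) <<< i else 0 := by
  rw [pv_shl_one]
  unfold PySem.Int.band pvIbit
  have hp : (0 : Int) ≤ ((2 ^ i : Nat) : Int) := by positivity
  by_cases hx : 0 ≤ x
  · rw [if_pos hp, if_pos hx, if_pos hx, Int.toNat_natCast, Nat.two_pow_and]
    cases htb : x.toNat.testBit i <;> simp
  · rw [if_pos hp, if_neg hx, if_neg hx, Int.toNat_natCast, Nat.two_pow_and]
    cases htb : (-x - 1).toNat.testBit i <;> simp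

lemma pv_ibit_bxor (x y : Int) (i : Nat) :
    pvIbit (PySem.Int.bxor x y) i = xor (pvIbit x i) (pvIbit y i) := by
  unfold PySem.Int.bxor pvIbit
  by_cases hx : 0 ≤ x <;> by_cases hy : 0 ≤ y
  · rw [if_pos hx, if_pos hy, if_pos hx, if_pos hy,
        if_pos (by positivity : (0 : Int) ≤ ↑(x.toNat ^^^ y.toNat)), Int.toNat_natCast,
        Nat.testBit_xor]
  · rw [if_pos hx, if_neg hy, if_pos hx, if_neg hy,
        if_neg (pv_neg_aux _), pv_neg_aux2, Nat.testBit_xor]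
    cases x.toNat.testBit i <;> cases (-y - 1).toNat.testBit i <;> rfl
  · rw [if_neg hx, if_pos hy, if_neg hx, if_pos hy,
        if_neg (pv_neg_aux _), pv_neg_aux2, Nat.testBit_xor]
    cases (-x - 1).toNat.testBit i <;> cases y.toNat.testBit i <;> rfl
  · rw [if_neg hx, if_neg hy, if_neg hx, if_neg hy,
        if_pos (by positivity : (0 : Int) ≤ ↑((-x - 1).toNat ^^^ (-y - 1).toNat)),
        Int.toNat_natCast, Nat.testBit_xor]
    cases (-x - 1).toNat.testBit i <;> cases (-y - 1).toNat.testBit i <;> rfl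

lemma pv_bor_eq_bxor {x : Int} {i : Nat} (h : pvIbit x i = false) :
    PySem.Int.bor x ((1 : Int) <<< i) = PySem.Int.bxor x ((1 : Int) <<< i) := by
  rw [pv_shl_one]
  unfold PySem.Int.bor PySem.Int.bxor
  unfold pvIbit at h
  have hp : (0 : Int) ≤ ((2 ^ i : Nat) : Int) := by positivity
  by_cases hx : 0 ≤ x
  · rw [if_pos hx] at h
    rw [if_pos hx, if_pos hp, if_pos hx, if_pos hp, Int.toNat_natCast]
    congr 1
    apply Nat.eq_of_testBit_eq
    intro j
    rw [Nat.testBit_or, Nat.testBit_xor, Nat.testBit_two_pow]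
    rcases eq_or_ne i j with rfl | hne
    · simp [h]
    · simp [hne]
  · rw [if_neg hx] at h
    have htb : (-x - 1).toNat.testBit i = true := by
      cases hb : (-x - 1).toNat.testBit i
      · rw [hb] at h; simp at h
      · rfl
    rw [if_neg hx, if_pos hp, if_neg hx, if_pos hp, Int.toNat_natCast]
    rw [Nat.and_two_pow, htb, (pv_nxor2 htb).1]
    simp

lemma pv_bxor_shift {m0 i : Nat} (x : Int) (h : m0 < 2 ^ i) :
    PySem.Int.bxor x (↑(2 ^ i + m0)) = PySem.Int.bxor (PySem.Int.bxor x (↑m0)) ((1 : Int) <<< i) := by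
  rw [pv_shl_one]
  have htb : m0.testBit i = false := Nat.testBit_lt_two_pow h
  unfold PySem.Int.bxor
  by_cases hx : 0 ≤ x
  · simp only [if_pos hx, Int.natCast_nonneg, if_true, Int.toNat_natCast]
    congr 1
    rw [Nat.xor_assoc, pv_nxor1 htb]
  · simp only [if_neg hx, Int.natCast_nonneg, if_true, Int.toNat_natCast]
    have hneg : ¬ (0:Int) ≤ -((((-x - 1).toNat ^^^ m0 : Nat)) : Int) - 1 := by omega
    simp only [if_neg hneg]
    have h4 : (-(-(((((-x - 1).toNat ^^^ m0 : Nat)) : Int)) - 1) - 1).toNat = (-x - 1).toNat ^^^ m0 := by omega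
    rw [h4]
    congr 2
    rw [Nat.xor_assoc, pv_nxor1 htb]

lemma pv_band_mask (x : Int) (k : Nat) :
    PySem.Int.band x (((1 : Int) <<< k) - 1) = ↑(pvMask x k) := by
  rw [pv_shl_one]
  have hc : ((2 ^ k : Nat) : Int) - 1 = ((2 ^ k - 1 : Nat) : Int) := by
    have : (1:Nat) ≤ 2 ^ k := Nat.one_le_two_pow
    omega
  rw [hc]
  unfold PySem.Int.band pvMask
  have hp : (0 : Int) ≤ ((2 ^ k - 1 : Nat) : Int) := by positivity
  by_cases hx : 0 ≤ x
  · rw [if_pos hx, if_pos hp, if_pos hx, Int.toNat_natCast, Nat.and_two_pow_sub_one_eq_mod]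
  · rw [if_neg hx, if_pos hp, if_neg hx, Int.toNat_natCast, Nat.land_comm,
        Nat.and_two_pow_sub_one_eq_mod]

lemma pv_mask_lt (x : Int) (k : Nat) : pvMask x k < 2 ^ k := by
  unfold pvMask
  have h1 : (0:Nat) < 2 ^ k := by positivity
  by_cases hx : 0 ≤ x
  · rw [if_pos hx]; exact Nat.mod_lt _ h1
  · rw [if_neg hx]; omega

lemma pv_mask_zero (x : Int) : pvMask x 0 = 0 := by
  simp [pvMask, Nat.mod_one]

lemma pv_mask_succ (x : Int) (k : Nat) :
    pvMask x (k + 1) = pvMask x k + (if pvIbit x k then 2 ^ k else 0) := by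
  unfold pvMask pvIbit
  by_cases hx : 0 ≤ x
  · rw [if_pos hx, if_pos hx, if_pos hx]
    have h1 := Nat.mod_pow_succ (x := x.toNat) (b := 2) (k := k)
    have h2 := Nat.testBit_eq_decide_div_mod_eq (x := x.toNat) (i := k)
    have h3 : x.toNat / 2 ^ k % 2 = 0 ∨ x.toNat / 2 ^ k % 2 = 1 := by omega
    rcases h3 with h3 | h3 <;> rw [h3] at h1 h2
    · have hb : x.toNat.testBit k = false := by rw [h2]; simp
      rw [hb, if_neg (by simp)]
      omega
    · have hb : x.toNat.testBit k = true := by rw [h2]; simp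
      rw [hb, if_pos rfl]
      omega
  · rw [if_neg hx, if_neg hx, if_neg hx]
    have h1 := Nat.mod_pow_succ (x := (-x - 1).toNat) (b := 2) (k := k)
    have h2 := Nat.testBit_eq_decide_div_mod_eq (x := (-x - 1).toNat) (i := k)
    have hlt : (-x - 1).toNat % 2 ^ k < 2 ^ k := Nat.mod_lt _ (by positivity)
    have hpk : (1 : Nat) ≤ 2 ^ k := Nat.one_le_two_pow
    have hp2 : (2 : Nat) ^ (k + 1) = 2 ^ k * 2 := by ring
    have h3 : (-x - 1).toNat / 2 ^ k % 2 = 0 ∨ (-x - 1).toNat / 2 ^ k % 2 = 1 := by omega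
    rcases h3 with h3 | h3 <;> rw [h3] at h1 h2
    · have hb : (-x - 1).toNat.testBit k = false := by rw [h2]; simp
      rw [hb, if_pos (by simp)]
      omega
    · have hb : (-x - 1).toNat.testBit k = true := by rw [h2]; simp
      rw [hb, if_neg (by simp)]
      omega

lemma pv_bitLength_cast_le {m0 k : Nat} (h : m0 < 2 ^ k) : PySem.Int.bitLength (↑m0) ≤ k := by
  rcases Nat.eq_zero_or_pos m0 with rfl | hpos
  · simp [PySem.Int.bitLength_zero]
  · have hne : ((m0 : Int)) ≠ 0 := by omega
    have h1 := PySem.Int.two_pow_bitLength_le (↑m0) hne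
    rw [Int.natAbs_natCast] at h1
    by_contra hk
    have : k ≤ PySem.Int.bitLength (↑m0) - 1 := by omega
    have := Nat.pow_le_pow_right (by omega : 1 ≤ 2) this
    omega

lemma pv_bitLength_top {m0 k : Nat} (h : m0 < 2 ^ k) :
    PySem.Int.bitLength (↑(2 ^ k + m0)) = k + 1 := by
  have hne : (((2 ^ k + m0 : Nat) : Int)) ≠ 0 := by positivity
  have h1 := PySem.Int.two_pow_bitLength_le _ hne
  have h2 := PySem.Int.lt_two_pow_bitLength ((2 ^ k + m0 : Nat) : Int)
  rw [Int.natAbs_natCast] at h1 h2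
  set L := PySem.Int.bitLength ((2 ^ k + m0 : Nat) : Int) with hL
  have hk1 : 2 ^ k < 2 ^ L := by omega
  have hklt : k < L := (Nat.pow_lt_pow_iff_right (by omega)).1 hk1
  have hup : 2 ^ (L - 1) < 2 ^ (k + 1) := by
    have : (2:Nat) ^ (k+1) = 2 ^ k * 2 := by ring
    omega
  have := (Nat.pow_lt_pow_iff_right (by omega : 1 < 2)).1 hup
  omega

-- ---- facts about B's loop ----

-- one non-trivial iteration of B's loop clears the top bit: m becomes m - 2^(bitLength m - 1)
lemma pv_step_char (m0 : Nat) (h : m0 ≠ 0) :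
    ∃ r, r < 2 ^ (PySem.Int.bitLength (↑m0) - 1) ∧
      m0 = 2 ^ (PySem.Int.bitLength (↑m0) - 1) + r ∧
      PySem.Int.bxor (↑m0) ((1 : Int) <<< (PySem.Int.bitLength (↑m0) - 1)) = ↑r := by
  have h1 := PySem.Int.two_pow_bitLength_le (↑m0 : Int) (by simpa using h)
  have h2 := PySem.Int.lt_two_pow_bitLength (↑m0 : Int)
  rw [Int.natAbs_natCast] at h1 h2
  have hbL : 1 ≤ PySem.Int.bitLength ((m0 : Nat) : Int) := by
    by_contra hc
    have hz : PySem.Int.bitLength ((m0 : Nat) : Int) = 0 := by omega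
    rw [hz, pow_zero] at h2
    omega
  set k := PySem.Int.bitLength ((m0 : Nat) : Int) - 1 with hk
  have hk1 : PySem.Int.bitLength ((m0 : Nat) : Int) = k + 1 := by omega
  rw [hk1, pow_succ] at h2
  refine ⟨m0 - 2 ^ k, by omega, by omega, ?_⟩
  rw [pv_shl_one, PySem.Int.bxor_natCast]
  have htb : (m0 - 2 ^ k).testBit k = false := Nat.testBit_lt_two_pow (by omega)
  have hdec : m0 = 2 ^ k + (m0 - 2 ^ k) := by omega
  rw [hdec, pv_nxor0 htb]
  omega

lemma pv_bloop_zero (a : Int) (f : Nat) (out : List Int) : pvBLoop a f 0 out = out := by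
  cases f <;> simp [pvBLoop]

lemma pv_bloop_append (a : Int) (f : Nat) :
    ∀ (m : Int) (pre out : List Int), pvBLoop a f m (pre ++ out) = pre ++ pvBLoop a f m out := by
  induction f with
  | zero => intro m pre out; rfl
  | succ f ih =>
    intro m pre out
    by_cases hm : m = 0
    · simp [pvBLoop, hm]
    · simp only [pvBLoop, if_neg hm]
      rw [List.append_assoc]
      exact ih _ _ _

lemma pv_bloop_fuel (a : Int) :
    ∀ (f f' : Nat) (m0 : Nat) (out : List Int), PySem.Int.bitLength (↑m0) ≤ f →
      PySem.Int.bitLength (↑m0) ≤ f' → pvBLoop a f (↑m0) out = pvBLoop a f' (↑m0) out := by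
  intro f
  induction f with
  | zero =>
    intro f' m0 out h h'
    have hbl : PySem.Int.bitLength (↑m0 : Int) = 0 := Nat.le_zero.mp h
    have h2 := PySem.Int.lt_two_pow_bitLength (↑m0 : Int)
    rw [Int.natAbs_natCast, hbl, pow_zero] at h2
    have hz : m0 = 0 := by omega
    subst hz
    rw [Nat.cast_zero, pv_bloop_zero, pv_bloop_zero]
  | succ f ih =>
    intro f' m0 out h h'
    rcases Nat.eq_zero_or_pos m0 with rfl | hpos
    · rw [Nat.cast_zero, pv_bloop_zero, pv_bloop_zero]
    · obtain ⟨r, hr, htop, hstep⟩ := pv_step_char m0 (by omega)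
      have hbL : 1 ≤ PySem.Int.bitLength ((m0 : Nat) : Int) := by
        by_contra hc
        have := PySem.Int.lt_two_pow_bitLength (↑m0 : Int)
        rw [Int.natAbs_natCast] at this
        have hz : PySem.Int.bitLength ((m0 : Nat) : Int) = 0 := by omega
        rw [hz] at this
        omega
      obtain ⟨g, rfl⟩ : ∃ g, f' = g + 1 := ⟨f' - 1, by omega⟩
      have hm0 : ((m0 : Nat) : Int) ≠ 0 := by
        simpa using (by omega : m0 ≠ 0)
      simp only [pvBLoop, if_neg hm0]
      rw [hstep]
      have hrle := pv_bitLength_cast_le hr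
      exact ih _ _ _ (by omega) (by omega)

-- ---- the main induction: A's fold over range(k) versus B's top-bit loop ----

lemma pv_main (a b : Int) (k : Nat) :
    ((List.range k).map (fun j : Nat => (j : Int))).foldl (pvAStep b) (a, [a])
    = (PySem.Int.bxor a (↑(pvMask (PySem.Int.bxor a b) k)),
       (pvBLoop a (PySem.Int.bitLength (↑(pvMask (PySem.Int.bxor a b) k)))
         (↑(pvMask (PySem.Int.bxor a b) k))
         [PySem.Int.bxor a (↑(pvMask (PySem.Int.bxor a b) k))]).reverse) := by
  induction k with
  | zero =>
    simp [pv_mask_zero, PySem.Int.bxor_zero, PySem.Int.bitLength_zero, pv_bloop_zero]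
  | succ k ih =>
    rw [List.range_succ, List.map_append, List.foldl_append, ih]
    simp only [List.map_cons, List.map_nil, List.foldl_cons, List.foldl_nil]
    set d := PySem.Int.bxor a b with hd
    set m0 := pvMask d k with hm0def
    have hm0 : m0 < 2 ^ k := pv_mask_lt d k
    set cur := PySem.Int.bxor a (↑m0) with hcurdef
    have hcur : pvIbit cur k = pvIbit a k := by
      rw [hcurdef, pv_ibit_bxor, pv_ibit_natCast, Nat.testBit_lt_two_pow hm0]
      cases pvIbit a k <;> rfl
    have hdk : pvIbit d k = xor (pvIbit a k) (pvIbit b k) := pv_ibit_bxor a b k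
    have hbitne : ((1 : Int) <<< k) ≠ 0 := by rw [pv_shl_one]; positivity
    -- A's codes list so far ends in `cur`
    have hcodes : pvBLoop a (PySem.Int.bitLength (↑m0)) (↑m0) [cur]
        = [cur] ++ pvBLoop a (PySem.Int.bitLength (↑m0)) (↑m0) [] := by
      conv_lhs => rw [show [cur] = [cur] ++ ([] : List Int) from rfl]
      rw [pv_bloop_append]
    unfold pvAStep
    simp only [Int.toNat_natCast, pv_band_pow, hcur]
    rw [pv_mask_succ d k, hdk]
    cases hak : pvIbit a k <;> cases hbk : pvIbit b k
    all_goals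
      have hlast : PySem.List.pyGetD (pvBLoop a (PySem.Int.bitLength (↑m0)) (↑m0) [cur]).reverse (-1) 0 = cur := by
        rw [hcodes, List.reverse_append, show ([cur]).reverse = [cur] from rfl,
          PySem.List.pyGetD_neg_one_append_singleton]
      simp only [Bool.false_eq_true, eq_self_iff_true, ite_false, ite_true, if_false, if_true,
        true_and, and_true, and_self, Bool.false_xor, Bool.xor_false, Bool.true_xor,
        Bool.xor_true, Bool.not_true, Bool.not_false, Nat.add_zero]
    ·
      have hz1 : ¬ ((0 : Int) = (1 : Int) <<< k) := fun hc => hbitne hc.symm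
      rw [if_neg hz1, if_neg hz1, if_neg (by rw [hlast]; simp)]
    ·
      rw [pv_bor_eq_bxor (by rw [hcur, hak]),
          show PySem.Int.bxor cur ((1 : Int) <<< k) = PySem.Int.bxor a (↑(2 ^ k + m0)) from (pv_bxor_shift a hm0).symm]
      have hne : PySem.Int.bxor a (↑(2 ^ k + m0)) ≠ cur := by
        intro hcon
        have hcb := congrArg (fun z => pvIbit z k) hcon
        simp only [pv_ibit_bxor, pv_ibit_natCast, hcur] at hcb
        rw [Nat.testBit_two_pow_add_eq, Nat.testBit_lt_two_pow hm0, hak] at hcb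
        simp at hcb
      rw [if_pos (by rw [hlast]; exact hne)]
      rw [Nat.add_comm m0 (2 ^ k)]
      have hbl1 : PySem.Int.bitLength ((2 ^ k + m0 : Nat) : Int) = k + 1 := pv_bitLength_top hm0
      rw [hbl1]
      have hm1ne : ((2 ^ k + m0 : Nat) : Int) ≠ 0 := by positivity
      have hstep : PySem.Int.bxor ((2 ^ k + m0 : Nat) : Int)
          ((1 : Int) <<< (PySem.Int.bitLength ((2 ^ k + m0 : Nat) : Int) - 1)) = ((m0 : Nat) : Int) := by
        rw [hbl1, Nat.add_sub_cancel, pv_shl_one, PySem.Int.bxor_natCast,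
            pv_nxor0 (Nat.testBit_lt_two_pow hm0)]
      have hunf : pvBLoop a (k + 1) ((2 ^ k + m0 : Nat) : Int) [PySem.Int.bxor a (↑(2 ^ k + m0))]
          = [PySem.Int.bxor a (↑(2 ^ k + m0))] ++ pvBLoop a k ((m0 : Nat) : Int) [cur] := by
        simp only [pvBLoop, if_neg hm1ne, hstep, ← hcurdef]
        exact pv_bloop_append a k _ _ _
      rw [hunf, pv_bloop_fuel a k (PySem.Int.bitLength ((m0 : Nat) : Int)) m0 [cur]
            (pv_bitLength_cast_le hm0) le_rfl, List.reverse_append]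
      rfl
    ·
      have hz3 : ¬ ((1 : Int) <<< k = 0 ∧ (0 : Int) = (1 : Int) <<< k) := fun hc => hbitne hc.1
      rw [if_neg hz3,
          show PySem.Int.bxor cur ((1 : Int) <<< k) = PySem.Int.bxor a (↑(2 ^ k + m0)) from (pv_bxor_shift a hm0).symm]
      have hne : PySem.Int.bxor a (↑(2 ^ k + m0)) ≠ cur := by
        intro hcon
        have hcb := congrArg (fun z => pvIbit z k) hcon
        simp only [pv_ibit_bxor, pv_ibit_natCast, hcur] at hcb
        rw [Nat.testBit_two_pow_add_eq, Nat.testBit_lt_two_pow hm0, hak] at hcb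
        simp at hcb
      rw [if_pos (by rw [hlast]; exact hne)]
      rw [Nat.add_comm m0 (2 ^ k)]
      have hbl1 : PySem.Int.bitLength ((2 ^ k + m0 : Nat) : Int) = k + 1 := pv_bitLength_top hm0
      rw [hbl1]
      have hm1ne : ((2 ^ k + m0 : Nat) : Int) ≠ 0 := by positivity
      have hstep : PySem.Int.bxor ((2 ^ k + m0 : Nat) : Int)
          ((1 : Int) <<< (PySem.Int.bitLength ((2 ^ k + m0 : Nat) : Int) - 1)) = ((m0 : Nat) : Int) := by
        rw [hbl1, Nat.add_sub_cancel, pv_shl_one, PySem.Int.bxor_natCast,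
            pv_nxor0 (Nat.testBit_lt_two_pow hm0)]
      have hunf : pvBLoop a (k + 1) ((2 ^ k + m0 : Nat) : Int) [PySem.Int.bxor a (↑(2 ^ k + m0))]
          = [PySem.Int.bxor a (↑(2 ^ k + m0))] ++ pvBLoop a k ((m0 : Nat) : Int) [cur] := by
        simp only [pvBLoop, if_neg hm1ne, hstep, ← hcurdef]
        exact pv_bloop_append a k _ _ _
      rw [hunf, pv_bloop_fuel a k (PySem.Int.bitLength ((m0 : Nat) : Int)) m0 [cur]
            (pv_bitLength_cast_le hm0) le_rfl, List.reverse_append]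
      rfl
    ·
      have hz4 : ¬ ((1 : Int) <<< k = 0) := hbitne
      rw [if_neg hz4, if_neg hz4, if_neg (by rw [hlast]; simp)]

lemma pv_core (a b nq : Int) :
    ((PySem.List.pyRange 0 nq 1).foldl (pvAStep b) (a, [a])).2
    = (pvBLoop a
        (PySem.Int.bitLength (if nq > 0 then
          PySem.Int.band (PySem.Int.bxor a b) (((1 : Int) <<< nq.toNat) - 1) else 0))
        (if nq > 0 then PySem.Int.band (PySem.Int.bxor a b) (((1 : Int) <<< nq.toNat) - 1) else 0)
        [PySem.Int.bxor a (if nq > 0 then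
          PySem.Int.band (PySem.Int.bxor a b) (((1 : Int) <<< nq.toNat) - 1) else 0)]).reverse := by
  by_cases hnq : nq > 0
  · have hrange : PySem.List.pyRange 0 nq 1 = PySem.List.pyRange 0 (↑nq.toNat) 1 := by
      rw [Int.toNat_of_nonneg (by omega)]
    rw [hrange, PySem.List.pyRange_zero_natCast, if_pos hnq, pv_band_mask]
    rw [pv_main a b nq.toNat]
  · have hrange : PySem.List.pyRange 0 nq 1 = [] := by
      simp [PySem.List.pyRange]
      omega
    rw [hrange, if_neg hnq]
    simp [PySem.Int.bitLength_zero, PySem.Int.bxor_zero, pv_bloop_zero]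

-- ===== VERDICT (by name: the statement is the Claim_ definition above) =====
theorem build_gray_codes_spec : Claim_equal_build_gray_codes := by
  intro n1 n2 nq _
  unfold Spec_build_gray_codes build_gray_codes build_gray_codes_alt
  exact pv_core _ _ nq
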